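-- pv_equiv track=rewrite | github.com/bedhededdy/advent-of-code | 2023/p3.py | get_numbers_and_start_pos
-- ===== SOURCE A (Python) =====
-- def get_numbers_and_start_pos(line):
--     res = []
--     i = 0
--     while i < len(line):
--         if line[i].isdigit():
--             start_pos = i
--             while i < len(line) and line[i].isdigit():
--                 i += 1
--             end_pos = i
--             res.append((int(line[start_pos:end_pos]), start_pos))
--         else:
--             i += 1
--     return res
-- ===== SOURCE B (Python) =====
-- def get_numbers_and_start_pos(line):
--     res = []
--     buf = ''
--     start = -1
--     for i, ch in enumerate(line):
--         if ch.isdigit():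
--             if not buf:
--                 start = i
--             buf += ch
--         elif buf:
--             res.append((int(buf), start))
--             buf = ''
--     if buf:
--         res.append((int(buf), start))
--     return res
-- ===== Notes on version B (the rewrite author's own statement) =====
-- stated objective: alternative
-- what changed: Replaced the index-driven while-loop with an inner digit-scanning while and int(line[start:end]) slicing by a single for-loop over enumerate(line) that accumulates the current digit run in a buffer and flushes it when the run ends.
import Mathlib
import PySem

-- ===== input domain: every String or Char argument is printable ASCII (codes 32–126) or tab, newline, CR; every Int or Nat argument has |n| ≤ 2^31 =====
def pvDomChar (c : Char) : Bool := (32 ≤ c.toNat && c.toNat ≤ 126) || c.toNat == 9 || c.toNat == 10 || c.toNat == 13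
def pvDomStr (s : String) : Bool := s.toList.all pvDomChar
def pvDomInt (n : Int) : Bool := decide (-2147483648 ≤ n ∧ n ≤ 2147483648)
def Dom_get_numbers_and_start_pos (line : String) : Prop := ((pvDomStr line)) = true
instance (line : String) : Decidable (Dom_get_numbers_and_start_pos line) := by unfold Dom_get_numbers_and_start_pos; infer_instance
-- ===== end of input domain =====

-- B replaces A's index-driven while-loop (inner digit scan + int(line[start:end]) slice) by a
-- single buffered pass over enumerate(line); same values, similar cost ("alternative").


-- ===== PORT A =====
-- inner `while i < len(line) and line[i].isdigit(): i += 1` (returns the final i = end_pos)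
def pvScan (cs : List Char) (i : Nat) : Nat :=
  if h : i < cs.length then
    if PySem.Chars.isdigit cs[i] then pvScan cs (i + 1) else i
  else i
termination_by cs.length - i

-- the inner while advances: needed for the outer loop's termination
theorem pvScan_ge (cs : List Char) (i : Nat) : i ≤ pvScan cs i := by
  fun_induction pvScan cs i with
  | case1 i h hd ih => omega
  | case2 i h hd => omega
  | case3 i h => omega

-- outer `while i < len(line)` of A; int() cannot raise where taken (the slice is a nonempty
-- run of chars satisfying isdigit), so `.getD 0` is dead; exact step for step otherwise
def aLoop (cs : List Char) (i : Nat) : List (Int × Int) :=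
  if h : i < cs.length then
    if PySem.Chars.isdigit cs[i] then
      let e := pvScan cs i
      ((PySem.Int.ofChars? (PySem.List.slice cs (some (i : Int)) (some (e : Int)))).getD 0,
        (i : Int)) :: aLoop cs e
    else aLoop cs (i + 1)
  else []
termination_by cs.length - i
decreasing_by
  · have h1 : i + 1 ≤ pvScan cs (i + 1) := pvScan_ge cs (i + 1)
    have h2 : pvScan cs i = pvScan cs (i + 1) := by
      conv_lhs => rw [pvScan]
      simp_all
    omega
  · omega

def get_numbers_and_start_pos (line : String) : List (Int × Int) := aLoop line.toList 0

-- ===== PORT B =====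
-- the `for i, ch in enumerate(line)` of Source B, carrying (res, buf, start); the trailing
-- `if buf:` flush is the base case; `.getD 0` dead as in A's port
def bLoop (cs : List Char) (i : Nat) (res : List (Int × Int)) (buf : List Char) (start : Int) :
    List (Int × Int) :=
  match cs with
  | [] => if buf.isEmpty then res else res ++ [((PySem.Int.ofChars? buf).getD 0, start)]
  | ch :: rest =>
    if PySem.Chars.isdigit ch then
      bLoop rest (i + 1) res (buf ++ [ch]) (if buf.isEmpty then (i : Int) else start)
    else if buf.isEmpty then bLoop rest (i + 1) res [] start
    else bLoop rest (i + 1) (res ++ [((PySem.Int.ofChars? buf).getD 0, start)]) [] start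

def get_numbers_and_start_pos_alt (line : String) : List (Int × Int) :=
  bLoop line.toList 0 [] [] (-1)

-- ===== PRECONDITION & SPEC =====
def Spec_get_numbers_and_start_pos (line : String) (out : List (Int × Int)) : Prop := out = get_numbers_and_start_pos_alt line
instance (line : String) (out : List (Int × Int)) : Decidable (Spec_get_numbers_and_start_pos line out) := by unfold Spec_get_numbers_and_start_pos; infer_instance

-- ===== CLAIM (what is proved, stated in full; the proofs are below) =====
def Claim_equal_get_numbers_and_start_pos : Prop := ∀ (line : String), Dom_get_numbers_and_start_pos line → Spec_get_numbers_and_start_pos line (get_numbers_and_start_pos line)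

-- ===== LEMMAS AND PROOFS =====
-- common reference form: the result as a structural recursion over the remaining suffix
def pvVal (ds : List Char) : Int := (PySem.Int.ofChars? ds).getD 0

def aSuf : List Char → Nat → List (Int × Int)
  | [], _ => []
  | ch :: rest, i =>
    if PySem.Chars.isdigit ch then
      (pvVal (ch :: rest.takeWhile PySem.Chars.isdigit), (i : Int)) ::
        aSuf (rest.dropWhile PySem.Chars.isdigit) (i + 1 + (rest.takeWhile PySem.Chars.isdigit).length)
    else aSuf rest (i + 1)
termination_by cs _ => cs.length
decreasing_by
  · have := List.length_dropWhile_le (p := PySem.Chars.isdigit) (l := rest)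
    simp; omega
  · simp

theorem pvScan_eq (cs : List Char) (i : Nat) :
    pvScan cs i = i + ((cs.drop i).takeWhile PySem.Chars.isdigit).length := by
  fun_induction pvScan cs i with
  | case1 i h hd ih =>
    rw [List.drop_eq_getElem_cons h]
    rw [List.takeWhile_cons_of_pos hd]
    simp [ih]; omega
  | case2 i h hd =>
    rw [List.drop_eq_getElem_cons h]
    rw [List.takeWhile_cons_of_neg (by simp [hd])]
    simp
  | case3 i h =>
    rw [List.drop_eq_nil_of_le (by omega)]
    simp

theorem take_takeWhile_len {α : Type} (p : α → Bool) (l : List α) :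
    l.take (l.takeWhile p).length = l.takeWhile p := by
  induction l with
  | nil => simp
  | cons a l ih =>
    by_cases h : p a
    · rw [List.takeWhile_cons_of_pos h]; simpa using ih
    · rw [List.takeWhile_cons_of_neg (by simp [h])]; simp

theorem drop_takeWhile_len {α : Type} (p : α → Bool) (l : List α) :
    l.drop (l.takeWhile p).length = l.dropWhile p := by
  induction l with
  | nil => simp
  | cons a l ih =>
    by_cases h : p a
    · rw [List.takeWhile_cons_of_pos h, List.dropWhile_cons_of_pos h]; simpa using ih
    · rw [List.takeWhile_cons_of_neg (by simp [h]), List.dropWhile_cons_of_neg (by simp [h])]; simp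

theorem aLoop_eq_aSuf (cs : List Char) (i : Nat) : aLoop cs i = aSuf (cs.drop i) i := by
  fun_induction aLoop cs i with
  | case1 i h hd e ih =>
    have hsc : pvScan cs i = i + ((cs.drop i).takeWhile PySem.Chars.isdigit).length :=
      pvScan_eq cs i
    have hdrop : cs.drop i = cs[i] :: cs.drop (i + 1) := List.drop_eq_getElem_cons h
    have htw : (cs.drop i).takeWhile PySem.Chars.isdigit
        = cs[i] :: (cs.drop (i + 1)).takeWhile PySem.Chars.isdigit := by
      rw [hdrop, List.takeWhile_cons_of_pos hd]
    have hlen : ((cs.drop i).takeWhile PySem.Chars.isdigit).length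
        = ((cs.drop (i + 1)).takeWhile PySem.Chars.isdigit).length + 1 := by
      rw [htw]; simp
    -- the slice A takes is exactly the digit run
    have hslice : PySem.List.slice cs (some (i : Int)) (some (e : Int))
        = (cs.drop i).takeWhile PySem.Chars.isdigit := by
      have he : (e : Int) = (i : Int) + (((cs.drop i).takeWhile PySem.Chars.isdigit).length : Int) := by
        simp only [e, hsc]; push_cast; ring
      rw [he, PySem.List.slice_natCast_add, take_takeWhile_len]
    have htail : cs.drop e = (cs.drop (i + 1)).dropWhile PySem.Chars.isdigit := by
      rw [← drop_takeWhile_len PySem.Chars.isdigit (cs.drop (i + 1)), List.drop_drop]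
      congr 1
      simp only [e, hsc]; omega
    have hidx : e = i + 1 + ((cs.drop (i + 1)).takeWhile PySem.Chars.isdigit).length := by
      simp only [e, hsc]; omega
    rw [hdrop, aSuf, if_pos hd, hslice, htw, ih, htail, hidx]
    simp [pvVal]
  | case2 i h hd ih =>
    rw [List.drop_eq_getElem_cons h, aSuf, if_neg (by simp [hd]), ih]
  | case3 i h =>
    rw [List.drop_eq_nil_of_le (by omega), aSuf]

theorem bLoop_inv (cs : List Char) :
    (∀ i res s, bLoop cs i res [] s = res ++ aSuf cs i) ∧
    (∀ i res buf s, buf ≠ [] →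
      bLoop cs i res buf s
        = res ++ ((pvVal (buf ++ cs.takeWhile PySem.Chars.isdigit), s)
            :: aSuf (cs.dropWhile PySem.Chars.isdigit)
                (i + (cs.takeWhile PySem.Chars.isdigit).length))) := by
  induction cs with
  | nil =>
    constructor
    · intro i res s; simp [bLoop, aSuf]
    · intro i res buf s hbuf
      simp [bLoop, aSuf, pvVal, List.isEmpty_iff, hbuf]
  | cons ch rest ih =>
    obtain ⟨ihA, ihB⟩ := ih
    constructor
    · intro i res s
      by_cases hd : PySem.Chars.isdigit ch
      · rw [bLoop, if_pos hd]
        simp only [List.isEmpty_nil, List.nil_append, if_true]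
        rw [ihB (i + 1) res [ch] (i : Int) (by simp), aSuf, if_pos hd]
        simp [Nat.add_comm, Nat.add_left_comm]
      · rw [bLoop, if_neg hd]
        simp only [List.isEmpty_nil, if_true]
        rw [ihA (i + 1) res s, aSuf, if_neg hd]
    · intro i res buf s hbuf
      have hne : buf.isEmpty = false := by simpa [List.isEmpty_iff] using hbuf
      by_cases hd : PySem.Chars.isdigit ch
      · rw [bLoop, if_pos hd, hne]
        simp only [Bool.false_eq_true, if_false]
        rw [ihB (i + 1) res (buf ++ [ch]) s (by simp),
          List.takeWhile_cons_of_pos hd, List.dropWhile_cons_of_pos hd]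
        simp [List.append_assoc, Nat.add_comm, Nat.add_left_comm]
      · rw [bLoop, if_neg hd, hne]
        simp only [Bool.false_eq_true, if_false]
        rw [ihA (i + 1) (res ++ [((PySem.Int.ofChars? buf).getD 0, s)]) s,
          List.takeWhile_cons_of_neg (by simp [hd]), List.dropWhile_cons_of_neg (by simp [hd])]
        simp only [List.length_nil, Nat.add_zero, List.append_nil]
        rw [aSuf, if_neg hd]
        simp [pvVal]

-- ===== VERDICT (by name: the statement is the Claim_ definition above) =====
theorem get_numbers_and_start_pos_spec : Claim_equal_get_numbers_and_start_pos := by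
  intro line _
  unfold Spec_get_numbers_and_start_pos get_numbers_and_start_pos get_numbers_and_start_pos_alt
  rw [aLoop_eq_aSuf, (bLoop_inv line.toList).1 0 [] (-1)]
  simp
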